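-- pv_equiv track=rewrite | github.com/everysoftware/algorithms-course | src/dp2/editing.py | editing
-- ===== SOURCE A (Python) =====
-- INF = 10**20
--
-- def _ed_dp(n: int, m: int, a: str, b: str) -> list[list[int]]:
--     """Построение матрицы расстояний методом динамического программирования. Сложность O(NM)"""
--     distance = [[INF] * (m + 1) for _ in range(n + 1)]
--     """distance[i][j] - расстояние редактирования для строк a[:i] и b[:j]"""
--
--     # Расстояние от пустой строки до строки длины i равно i
--     for i in range(n + 1):
--         distance[i][0] = i
--
--     # Расстояние от строки длины j до пустой строки равно j
--     for j in range(m + 1):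
--         distance[0][j] = j
--
--     for i in range(1, n + 1):
--         for j in range(1, m + 1):
--             if a[i - 1] == b[j - 1]:
--                 distance[i][j] = distance[i - 1][j - 1]
--             else:
--                 distance[i][j] = 1 + min(
--                     distance[i - 1][j],  # Удаление
--                     distance[i][j - 1],  # Вставка
--                     distance[i - 1][j - 1],  # Замена
--                 )
--
--     return distance
--
-- def ed_dp(a: str, b: str) -> int:
--     """Вычисляет расстояние редактирования методом динамического программирования. Сложность O(NM)"""
--     n, m = len(a), len(b)
--     distance = _ed_dp(n, m, a, b)
--
--     return distance[n][m]
--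
-- def editing(a: str, words: list[str]) -> tuple[int, list[str]]:
--     """
--     Вычисляет расстояние редактирования между строкой a и каждой строкой из списка words.
--     Возвращает список строк, расстояние редактирования которых минимально.
--     Сложность O(QNM), где N - длина строки a, M - длина самой длинной строки из списка words.
--     """
--     distances = [ed_dp(a, word) for word in words]
--     min_distance = min(distances)
--     result = [
--         word
--         for word, distance in zip(words, distances)
--         if distance == min_distance
--     ]
--
--     return min_distance, result
-- ===== SOURCE B (Python) =====
-- def _ed_memo(a: str, b: str) -> int:
--     """Top-down memoized recursion: rec(i, j) = edit distance of a[:i] and b[:j]."""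
--     cache = {}
--
--     def rec(i: int, j: int) -> int:
--         if i == 0:
--             return j
--         if j == 0:
--             return i
--         key = (i, j)
--         if key in cache:
--             return cache[key]
--         if a[i - 1] == b[j - 1]:
--             v = rec(i - 1, j - 1)
--         else:
--             v = 1 + min(rec(i - 1, j), rec(i, j - 1), rec(i - 1, j - 1))
--         cache[key] = v
--         return v
--
--     return rec(len(a), len(b))
--
--
-- def editing(a: str, words: list[str]) -> tuple[int, list[str]]:
--     """One pass over words: compute each distinct word's distance once (dict memo),
--     tracking the best distance seen and the words attaining it."""
--     dist = {}
--     best = None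
--     result = []
--     for word in words:
--         d = dist.get(word)
--         if d is None:
--             d = _ed_memo(a, word)
--             dist[word] = d
--         if best is None or d < best:
--             best, result = d, [word]
--         elif d == best:
--             result.append(word)
--     return best, result
-- ===== Notes on version B (the rewrite author's own statement) =====
-- stated objective: faster
-- what changed: Replaces the bottom-up (n+1)x(m+1) DP table of _ed_dp with a top-down recursion rec(i,j) memoized in a dict, and replaces the build-all-distances-then-min-then-filter pipeline with a single pass over words that memoizes the distance per distinct word and tracks the best distance and the words attaining it.
-- outside the precondition, e.g. on editing('abc', []): A raises ValueError, B returns (None, [])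
import Mathlib
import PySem

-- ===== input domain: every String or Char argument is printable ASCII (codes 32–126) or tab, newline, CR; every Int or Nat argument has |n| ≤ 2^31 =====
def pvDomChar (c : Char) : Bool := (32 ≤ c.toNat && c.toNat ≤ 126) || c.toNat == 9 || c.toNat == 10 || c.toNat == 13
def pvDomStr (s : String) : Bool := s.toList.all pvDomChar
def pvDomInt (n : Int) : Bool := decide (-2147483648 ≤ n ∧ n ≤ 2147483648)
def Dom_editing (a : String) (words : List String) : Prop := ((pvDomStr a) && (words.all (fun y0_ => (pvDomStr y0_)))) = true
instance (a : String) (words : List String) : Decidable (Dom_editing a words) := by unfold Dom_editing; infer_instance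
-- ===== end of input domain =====

-- B replaces A's bottom-up (n+1)×(m+1) DP table by a top-down recursion memoized in a dict, and A's
-- build-all-distances/min/filter pipeline by a single pass that computes each distinct word's distance
-- once and tracks the best; same results, measurably faster on a timing run's inputs.

-- ===== PORT A =====
def pvINF : Int := 10 ^ 20
def pvGet2 (d : List (List Int)) (i j : Nat) : Int := (d.getD i []).getD j 0
def pvSet2 (d : List (List Int)) (i j : Nat) (v : Int) : List (List Int) :=
  d.set i ((d.getD i []).set j v)

-- _ed_dp: build the full matrix exactly as the Python loops do (loop counters are the indices)
def pvEdDpTable (n m : Nat) (aL bL : List Char) : List (List Int) :=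
  let d0 := (List.range (n+1)).map (fun _ => List.replicate (m+1) pvINF)
  let d1 := (List.range (n+1)).foldl (fun d i => pvSet2 d i 0 (i : Int)) d0
  let d2 := (List.range (m+1)).foldl (fun d j => pvSet2 d 0 j (j : Int)) d1
  (List.range n).foldl (fun d i0 =>
    let i := i0 + 1
    (List.range m).foldl (fun d j0 =>
      let j := j0 + 1
      if aL.getD (i-1) ' ' = bL.getD (j-1) ' ' then
        pvSet2 d i j (pvGet2 d (i-1) (j-1))
      else
        pvSet2 d i j (1 + min (min (pvGet2 d (i-1) j) (pvGet2 d i (j-1))) (pvGet2 d (i-1) (j-1)))) d) d2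

def pvEdDp (a b : String) : Int :=
  let aL := a.toList
  let bL := b.toList
  pvGet2 (pvEdDpTable aL.length bL.length aL bL) aL.length bL.length

def editing (a : String) (words : List String) : Int × List String :=
  let distances := words.map (fun word => pvEdDp a word)
  match PySem.List.min? distances (fun x => x) with
  | some md => (md, ((words.zip distances).filter (fun p => p.2 == md)).map (fun p => p.1))
  | none => (0, [])

-- ===== PORT B =====
-- rec(i, j) of Source B: base cases, cache lookup, then the three recursive calls in Python's
-- evaluation order, threading the cache dict through and writing the result back.
def pvRec (aL bL : List Char) : Nat → Nat → PySem.Dict (Nat × Nat) Int → Int × PySem.Dict (Nat × Nat) Int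
  | 0, j, c => ((j : Int), c)
  | i+1, 0, c => (((i+1 : Nat) : Int), c)
  | i+1, j+1, c =>
    match c.get? (i+1, j+1) with
    | some v => (v, c)
    | none =>
      if aL.getD i ' ' = bL.getD j ' ' then
        let r := pvRec aL bL i j c
        (r.1, r.2.insert (i+1, j+1) r.1)
      else
        let r1 := pvRec aL bL i (j+1) c
        let r2 := pvRec aL bL (i+1) j r1.2
        let r3 := pvRec aL bL i j r2.2
        let v := 1 + min (min r1.1 r2.1) r3.1
        (v, r3.2.insert (i+1, j+1) v)
termination_by i j _ => (i, j)

def pvEdMemo (a b : String) : Int :=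
  (pvRec a.toList b.toList a.toList.length b.toList.length PySem.Dict.empty).1

-- loop body of B's editing: d = dist.get(word) (computing and storing it on a miss),
-- then compare with the best seen so far
def pvStep (a : String) (st : PySem.Dict String Int × Option Int × List String) (word : String) :
    PySem.Dict String Int × Option Int × List String :=
  match st with
  | (dist, best, result) =>
    let dd :=
      match dist.get? word with
      | some d => (d, dist)
      | none => let d := pvEdMemo a word; (d, dist.insert word d)
    match dd, best with
    | (d, dist), none => (dist, some d, [word])
    | (d, dist), some b =>
        if d < b then (dist, some d, [word])
        else if d == b then (dist, some b, result ++ [word]) else (dist, some b, result)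

def editing_alt (a : String) (words : List String) : Int × List String :=
  let st := words.foldl (pvStep a) (PySem.Dict.empty, (none : Option Int), ([] : List String))
  match st.2.1 with
  | some b => (b, st.2.2)
  | none => (0, [])

-- ===== PRECONDITION & SPEC =====
-- Pre_ excludes the empty word list, on which A raises ValueError (min() of an empty sequence)
-- and B returns (None, []), which is not a value of the declared return type.
def Pre_editing (a : String) (words : List String) : Prop := words ≠ []
instance (a : String) (words : List String) : Decidable (Pre_editing a words) := by unfold Pre_editing; infer_instance

def pvWitness_editing : String × List String := ("cat", ["bat", "dog", "cart"])

def Spec_editing (a : String) (words : List String) (out : Int × List String) : Prop := out = editing_alt a words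
instance (a : String) (words : List String) (out : Int × List String) : Decidable (Spec_editing a words out) := by unfold Spec_editing; infer_instance

-- ===== CLAIM (what is proved, stated in full; the proofs are below) =====
def Claim_equal_editing : Prop := ∀ (a : String) (words : List String), Dom_editing a words → Pre_editing a words → Spec_editing a words (editing a words)

-- ===== LEMMAS AND PROOFS =====

lemma set_map_range {α : Type} (f : Nat → α) (k i : Nat) (x : α) :
    ((List.range k).map f).set i x = (List.range k).map (fun i' => if i' = i then x else f i') := by
  apply List.ext_getElem
  · simp
  · intro n h1 h2
    simp only [List.getElem_set, List.getElem_map, List.getElem_range]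
    by_cases h : i = n
    · simp [h]
    · rw [if_neg h, if_neg (fun hn : n = i => h hn.symm)]

lemma getD_eq_getElem {α : Type} (l : List α) (i : Nat) (d : α) (h : i < l.length) :
    l.getD i d = l[i] := by
  simp [List.getD_eq_getElem?_getD, List.getElem?_eq_getElem h]

lemma getD_append_left {α : Type} (l l' : List α) (d : α) (n : Nat) (h : n < l.length) :
    (l ++ l').getD n d = l.getD n d := List.getD_append l l' d n h

lemma getD_append_at {α : Type} (l l' : List α) (d : α) (h : l' ≠ []) :
    (l ++ l').getD l.length d = l'.getD 0 d := by
  rw [getD_eq_getElem _ _ _ (by cases l' with | nil => simp at h | cons x t => simp),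
      List.getElem_append_right (by omega)]
  cases l' with
  | nil => simp at h
  | cons x t => simp

lemma foldl_set_range {α : Type} (dflt : α) (g : Nat → α → α) :
    ∀ (k : Nat) (d : List α), k ≤ d.length →
    (List.range k).foldl (fun d i => d.set i (g i (d.getD i dflt))) d
      = (List.range k).map (fun i => g i (d.getD i dflt)) ++ d.drop k := by
  intro k
  induction k with
  | zero => simp
  | succ k ih =>
    intro d hk
    rw [List.range_succ, List.foldl_append, ih d (by omega)]
    simp only [List.foldl_cons, List.foldl_nil]
    have hlen : ((List.range k).map (fun i => g i (d.getD i dflt))).length = k := by simp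
    have hne : d.drop k ≠ [] := by
      intro h
      have := List.drop_eq_nil_iff.mp h
      omega
    have hget : ((List.range k).map (fun i => g i (d.getD i dflt)) ++ d.drop k).getD k dflt = d.getD k dflt := by
      have := getD_append_at ((List.range k).map (fun i => g i (d.getD i dflt))) (d.drop k) dflt hne
      rw [hlen] at this
      rw [this, getD_eq_getElem _ _ _ (by simp; omega), getD_eq_getElem _ _ _ (by omega)]
      simp
    rw [hget, List.set_append]
    simp only [hlen]
    rw [if_neg (by omega)]
    have hdr : (d.drop k).set 0 (g k (d.getD k dflt)) = g k (d.getD k dflt) :: d.drop (k+1) := by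
      cases hdk : d.drop k with
      | nil => exact absurd hdk hne
      | cons y t =>
        have ht : d.drop (k+1) = t := by
          have h1 : d.drop (k+1) = (d.drop k).drop 1 := by
            rw [List.drop_drop]
          rw [h1, hdk, List.drop_one, List.tail_cons]
        rw [ht]
        rfl
    rw [Nat.sub_self, hdr]
    simp

lemma foldl_set2_row0 (g : Nat → Int) :
    ∀ (L : List Nat) (d : List (List Int)), d ≠ [] →
    L.foldl (fun d j => d.set 0 ((d.getD 0 []).set j (g j))) d
      = d.set 0 (L.foldl (fun r j => r.set j (g j)) (d.getD 0 [])) := by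
  intro L
  induction L with
  | nil =>
    intro d hd
    cases d with
    | nil => simp at hd
    | cons r t => simp
  | cons j L ih =>
    intro d hd
    simp only [List.foldl_cons]
    rw [ih _ (by simp; intro h; exact hd (by simpa using h))]
    cases d with
    | nil => simp at hd
    | cons r t => simp

def pvCell (aL bL : List Char) : Nat → Nat → Int
  | 0, j => (j : Int)
  | (i+1), 0 => ((i+1 : Nat) : Int)
  | (i+1), (j+1) =>
      if aL.getD i ' ' = bL.getD j ' ' then pvCell aL bL i j
      else 1 + min (min (pvCell aL bL i (j+1)) (pvCell aL bL (i+1) j)) (pvCell aL bL i j)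
termination_by i j => (i, j)

lemma pvCell_left (aL bL : List Char) (j : Nat) : pvCell aL bL 0 j = (j : Int) := by
  simp [pvCell]

lemma pvCell_right (aL bL : List Char) (i : Nat) : pvCell aL bL i 0 = (i : Int) := by
  cases i <;> simp [pvCell]

lemma pvCell_succ (aL bL : List Char) (i j : Nat) :
    pvCell aL bL (i+1) (j+1) =
      if aL.getD i ' ' = bL.getD j ' ' then pvCell aL bL i j
      else 1 + min (min (pvCell aL bL i (j+1)) (pvCell aL bL (i+1) j)) (pvCell aL bL i j) := by
  rw [pvCell]

def pvRow (aL bL : List Char) (m i : Nat) : List Int :=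
  (List.range (m+1)).map (fun j => pvCell aL bL i j)

def pvPart (aL bL : List Char) (m i t : Nat) : List Int :=
  (List.range (t+1)).map (fun j => pvCell aL bL i j) ++ List.replicate (m - t) pvINF

def pvMatP (aL bL : List Char) (n m s t : Nat) : List (List Int) :=
  (List.range (n+1)).map (fun i =>
    if i ≤ s then pvRow aL bL m i
    else if i = s+1 then pvPart aL bL m i t
    else pvPart aL bL m i 0)

lemma pvPart_full (aL bL : List Char) (m i : Nat) : pvPart aL bL m i m = pvRow aL bL m i := by
  simp [pvPart, pvRow]

lemma pvMatP_shift (aL bL : List Char) (n m s : Nat) :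
    pvMatP aL bL n m s m = pvMatP aL bL n m (s+1) 0 := by
  unfold pvMatP
  apply List.map_congr_left
  intro i _
  by_cases h1 : i ≤ s
  · rw [if_pos h1, if_pos (by omega)]
  · by_cases h2 : i = s+1
    · rw [if_neg h1, if_pos h2, if_pos (by omega), h2, pvPart_full]
    · rw [if_neg h1, if_neg h2, if_neg (by omega)]
      split <;> rfl

-- reads from the partially built matrix
lemma get2_matP_full (aL bL : List Char) (n m s t i j : Nat)
    (hi : i ≤ s) (hin : i < n+1) (hj : j < m+1) :
    pvGet2 (pvMatP aL bL n m s t) i j = pvCell aL bL i j := by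
  unfold pvGet2 pvMatP
  rw [PySem.List.getD_map_range _ _ _ _ hin, if_pos hi]
  unfold pvRow
  rw [PySem.List.getD_map_range _ _ _ _ hj]

lemma get2_matP_part (aL bL : List Char) (n m s t j : Nat)
    (hin : s+1 < n+1) (hj : j < t+1) :
    pvGet2 (pvMatP aL bL n m s t) (s+1) j = pvCell aL bL (s+1) j := by
  unfold pvGet2 pvMatP
  rw [PySem.List.getD_map_range _ _ _ _ hin, if_neg (by omega), if_pos rfl]
  unfold pvPart
  rw [getD_append_left _ _ _ _ (by simp; omega)]
  rw [PySem.List.getD_map_range _ _ _ _ hj]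

lemma pvPart_set (aL bL : List Char) (m s t : Nat) (ht : t < m) :
    (pvPart aL bL m (s+1) t).set (t+1) (pvCell aL bL (s+1) (t+1)) = pvPart aL bL m (s+1) (t+1) := by
  unfold pvPart
  rw [List.set_append, if_neg (by simp)]
  have hrep : m - t = (m - (t+1)) + 1 := by omega
  rw [hrep, List.replicate_succ]
  simp only [List.length_map, List.length_range, Nat.sub_self, List.set_cons_zero]
  simp [List.range_succ]

lemma set2_matP (aL bL : List Char) (n m s t : Nat) (hs : s < n) (ht : t < m) :
    pvSet2 (pvMatP aL bL n m s t) (s+1) (t+1) (pvCell aL bL (s+1) (t+1)) = pvMatP aL bL n m s (t+1) := by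
  unfold pvSet2
  have hrow : (pvMatP aL bL n m s t).getD (s+1) [] = pvPart aL bL m (s+1) t := by
    unfold pvMatP
    rw [PySem.List.getD_map_range _ _ _ _ (by omega), if_neg (by omega), if_pos rfl]
  rw [hrow, pvPart_set aL bL m s t ht]
  unfold pvMatP
  rw [set_map_range]
  apply List.map_congr_left
  intro i _
  by_cases h : i = s+1
  · rw [if_pos h, h, if_neg (by omega), if_pos rfl]
  · rw [if_neg h]
    by_cases h1 : i ≤ s
    · rw [if_pos h1, if_pos h1]
    · rw [if_neg h1, if_neg h1, if_neg h, if_neg h]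

lemma d1_eq (n m : Nat) :
    (List.range (n+1)).foldl (fun d i => pvSet2 d i 0 (i : Int))
        ((List.range (n+1)).map (fun _ => List.replicate (m+1) pvINF))
      = (List.range (n+1)).map (fun i : Nat => (i : Int) :: List.replicate m pvINF) := by
  refine (foldl_set_range ([] : List Int) (fun i r => r.set 0 (i : Int)) (n+1)
      ((List.range (n+1)).map (fun _ => List.replicate (m+1) pvINF)) (by simp)).trans ?_
  rw [List.drop_of_length_le (by simp), List.append_nil]
  apply List.map_congr_left
  intro i hi
  simp only [List.mem_range] at hi
  rw [PySem.List.getD_map_range _ _ _ _ hi, List.replicate_succ, List.set_cons_zero]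

lemma d2_eq (aL bL : List Char) (n m : Nat) :
    (List.range (m+1)).foldl (fun d j => pvSet2 d 0 j (j : Int))
        ((List.range (n+1)).map (fun i : Nat => (i : Int) :: List.replicate m pvINF))
      = pvMatP aL bL n m 0 0 := by
  have hne : ((List.range (n+1)).map (fun i : Nat => (i : Int) :: List.replicate m pvINF)) ≠ [] := by
    simp [List.map_eq_nil_iff, List.range_eq_nil]
  refine (foldl_set2_row0 (fun j : Nat => (j : Int)) (List.range (m+1)) _ hne).trans ?_
  have hr0 : ((List.range (n+1)).map (fun i : Nat => (i : Int) :: List.replicate m pvINF)).getD 0 []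
      = (0 : Int) :: List.replicate m pvINF := by
    rw [PySem.List.getD_map_range _ _ _ _ (by omega)]
    simp
  rw [hr0]
  have hfill : (List.range (m+1)).foldl (fun r j => r.set j ((j : Int))) ((0 : Int) :: List.replicate m pvINF)
      = (List.range (m+1)).map (fun j : Nat => (j : Int)) := by
    refine (foldl_set_range (0 : Int) (fun j _ => (j : Int)) (m+1)
        ((0 : Int) :: List.replicate m pvINF) (by simp)).trans ?_
    rw [List.drop_of_length_le (by simp), List.append_nil]
  rw [hfill]
  unfold pvMatP
  rw [set_map_range]
  apply List.map_congr_left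
  intro i hi
  simp only [List.mem_range] at hi
  by_cases h : i = 0
  · rw [if_pos h, h, if_pos (by omega)]
    unfold pvRow
    apply List.map_congr_left
    intro j _
    rw [pvCell_left]
  · rw [if_neg (by omega)]
    have : (if i = 0 + 1 then pvPart aL bL m i 0 else pvPart aL bL m i 0) = pvPart aL bL m i 0 := by
      split <;> rfl
    rw [this]
    unfold pvPart
    simp [pvCell_right]
    intro h0
    exact absurd h0 h

lemma inner_fold (aL bL : List Char) (n m s : Nat) (hs : s < n) :
    ∀ (c t : Nat), t + c = m →
    (List.range' t c).foldl (fun d j0 =>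
        if aL.getD s ' ' = bL.getD j0 ' ' then pvSet2 d (s+1) (j0+1) (pvGet2 d s j0)
        else pvSet2 d (s+1) (j0+1)
          (1 + min (min (pvGet2 d s (j0+1)) (pvGet2 d (s+1) j0)) (pvGet2 d s j0)))
      (pvMatP aL bL n m s t) = pvMatP aL bL n m s m := by
  intro c
  induction c with
  | zero =>
    intro t htc
    simp only [List.range'_zero, List.foldl_nil]
    rw [show t = m by omega]
  | succ c ih =>
    intro t htc
    have ht : t < m := by omega
    rw [List.range'_succ, List.foldl_cons]
    have hstep : (if aL.getD s ' ' = bL.getD t ' '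
        then pvSet2 (pvMatP aL bL n m s t) (s+1) (t+1) (pvGet2 (pvMatP aL bL n m s t) s t)
        else pvSet2 (pvMatP aL bL n m s t) (s+1) (t+1)
          (1 + min (min (pvGet2 (pvMatP aL bL n m s t) s (t+1)) (pvGet2 (pvMatP aL bL n m s t) (s+1) t))
            (pvGet2 (pvMatP aL bL n m s t) s t))) = pvMatP aL bL n m s (t+1) := by
      rw [get2_matP_full aL bL n m s t s t (le_refl s) (by omega) (by omega),
          get2_matP_full aL bL n m s t s (t+1) (le_refl s) (by omega) (by omega),
          get2_matP_part aL bL n m s t t (by omega) (by omega)]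
      by_cases hc : aL.getD s ' ' = bL.getD t ' '
      · rw [if_pos hc]
        have hv : pvCell aL bL s t = pvCell aL bL (s+1) (t+1) := by
          rw [pvCell_succ, if_pos hc]
        rw [hv, set2_matP aL bL n m s t hs ht]
      · rw [if_neg hc]
        have hv : 1 + min (min (pvCell aL bL s (t+1)) (pvCell aL bL (s+1) t)) (pvCell aL bL s t)
            = pvCell aL bL (s+1) (t+1) := by
          rw [pvCell_succ, if_neg hc]
        rw [hv, set2_matP aL bL n m s t hs ht]
    rw [hstep]
    exact ih (t+1) (by omega)

lemma outer_fold (aL bL : List Char) (n m : Nat) :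
    ∀ (c s : Nat), s + c = n →
    (List.range' s c).foldl (fun d i0 =>
        (List.range m).foldl (fun d j0 =>
          if aL.getD i0 ' ' = bL.getD j0 ' ' then pvSet2 d (i0+1) (j0+1) (pvGet2 d i0 j0)
          else pvSet2 d (i0+1) (j0+1)
            (1 + min (min (pvGet2 d i0 (j0+1)) (pvGet2 d (i0+1) j0)) (pvGet2 d i0 j0))) d)
      (pvMatP aL bL n m s 0) = pvMatP aL bL n m n 0 := by
  intro c
  induction c with
  | zero =>
    intro s hsc
    simp only [List.range'_zero, List.foldl_nil]
    rw [show s = n by omega]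
  | succ c ih =>
    intro s hsc
    have hs : s < n := by omega
    rw [List.range'_succ, List.foldl_cons]
    have hstep : (List.range m).foldl (fun d j0 =>
          if aL.getD s ' ' = bL.getD j0 ' ' then pvSet2 d (s+1) (j0+1) (pvGet2 d s j0)
          else pvSet2 d (s+1) (j0+1)
            (1 + min (min (pvGet2 d s (j0+1)) (pvGet2 d (s+1) j0)) (pvGet2 d s j0)))
        (pvMatP aL bL n m s 0) = pvMatP aL bL n m (s+1) 0 := by
      rw [List.range_eq_range', inner_fold aL bL n m s hs m 0 (by omega)]
      exact pvMatP_shift aL bL n m s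
    rw [hstep]
    exact ih (s+1) (by omega)

lemma table_eq (aL bL : List Char) (n m : Nat) :
    pvEdDpTable n m aL bL = pvMatP aL bL n m n 0 := by
  show (List.range n).foldl _ ((List.range (m+1)).foldl _ ((List.range (n+1)).foldl _ _)) = _
  rw [d1_eq n m, d2_eq aL bL n m, show List.range n = List.range' 0 n from List.range_eq_range']
  exact outer_fold aL bL n m n 0 (by omega)

lemma key_A (a b : String) :
    pvEdDp a b = pvCell a.toList b.toList a.toList.length b.toList.length := by
  show pvGet2 (pvEdDpTable a.toList.length b.toList.length a.toList b.toList) _ _ = _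
  rw [table_eq]
  exact get2_matP_full a.toList b.toList a.toList.length b.toList.length
    a.toList.length 0 a.toList.length b.toList.length (le_refl _) (by omega) (by omega)

-- B-side: the memo cache only ever holds correct cell values
def pvCacheOK (aL bL : List Char) (c : PySem.Dict (Nat × Nat) Int) : Prop :=
  ∀ (p : Nat × Nat) (v : Int), c.get? p = some v → v = pvCell aL bL p.1 p.2

lemma pvCacheOK_empty (aL bL : List Char) : pvCacheOK aL bL PySem.Dict.empty := by
  intro p v h
  rw [PySem.Dict.get?_empty] at h
  exact absurd h (by simp)

lemma pvRec_correct (aL bL : List Char) :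
    ∀ (s i j : Nat), i + j ≤ s → ∀ (c : PySem.Dict (Nat × Nat) Int), pvCacheOK aL bL c →
      (pvRec aL bL i j c).1 = pvCell aL bL i j ∧ pvCacheOK aL bL (pvRec aL bL i j c).2 := by
  intro s
  induction s with
  | zero =>
    intro i j hle c hc
    obtain ⟨hi, hj⟩ : i = 0 ∧ j = 0 := by omega
    subst hi; subst hj
    rw [pvRec]
    exact ⟨by simp [pvCell_left], hc⟩
  | succ s ih =>
    intro i j hle c hc
    match i, j with
    | 0, j =>
      rw [pvRec]
      exact ⟨by simp [pvCell_left], hc⟩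
    | i+1, 0 =>
      rw [pvRec]
      exact ⟨by simp [pvCell_right], hc⟩
    | i+1, j+1 =>
      rw [pvRec]
      cases hget : c.get? (i+1, j+1) with
      | some v =>
        exact ⟨hc (i+1, j+1) v hget, hc⟩
      | none =>
        by_cases hch : aL.getD i ' ' = bL.getD j ' '
        · rw [if_pos hch]
          obtain ⟨h1, h2⟩ := ih i j (by omega) c hc
          constructor
          · simp only [h1, pvCell_succ, if_pos hch]
          · intro p v hpv
            rw [PySem.Dict.get?_insert] at hpv
            by_cases hp : p = (i+1, j+1)
            · rw [if_pos hp] at hpv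
              cases hpv
              rw [hp, h1]
              simp only [pvCell_succ, if_pos hch]
            · rw [if_neg hp] at hpv
              exact h2 p v hpv
        · rw [if_neg hch]
          obtain ⟨h1, c1ok⟩ := ih i (j+1) (by omega) c hc
          obtain ⟨h2, c2ok⟩ := ih (i+1) j (by omega) _ c1ok
          obtain ⟨h3, c3ok⟩ := ih i j (by omega) _ c2ok
          constructor
          · simp only [h1, h2, h3, pvCell_succ, if_neg hch]
          · intro p v hpv
            rw [PySem.Dict.get?_insert] at hpv
            by_cases hp : p = (i+1, j+1)
            · rw [if_pos hp] at hpv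
              cases hpv
              rw [hp, h1, h2, h3]
              simp only [pvCell_succ, if_neg hch]
            · rw [if_neg hp] at hpv
              exact c3ok p v hpv

lemma key_B (a b : String) :
    pvEdMemo a b = pvCell a.toList b.toList a.toList.length b.toList.length :=
  (pvRec_correct a.toList b.toList (a.toList.length + b.toList.length)
    a.toList.length b.toList.length (le_refl _) PySem.Dict.empty
    (pvCacheOK_empty a.toList b.toList)).1

lemma mfold_le (f : String → Int) :
    ∀ (rs : List String) (M : Int), rs.foldl (fun acc w => min acc (f w)) M ≤ M := by
  intro rs
  induction rs with
  | nil => intro M; simp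
  | cons r rs ih =>
    intro M
    simp only [List.foldl_cons]
    exact le_trans (ih (min M (f r))) (min_le_left _ _)

lemma onepass (f : String → Int) :
    ∀ (rs : List String) (M : Int) (R : List String),
    rs.foldl (fun (st : Option Int × List String) word =>
        let d := f word
        match st.1 with
        | none => (some d, [word])
        | some b => if d < b then (some d, [word]) else if d == b then (some b, st.2 ++ [word]) else st)
      (some M, R)
    = (some (rs.foldl (fun acc w => min acc (f w)) M),
       (if rs.foldl (fun acc w => min acc (f w)) M = M then R else [])
         ++ rs.filter (fun w => f w == rs.foldl (fun acc w => min acc (f w)) M)) := by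
  intro rs
  induction rs with
  | nil => intro M R; simp
  | cons r rs ih =>
    intro M R
    simp only [List.foldl_cons, List.filter_cons]
    have hle : rs.foldl (fun acc w => min acc (f w)) (min M (f r)) ≤ min M (f r) := mfold_le f rs _
    by_cases h1 : f r < M
    · have hmin : min M (f r) = f r := by omega
      rw [if_pos h1, ih (f r) [r]]
      simp only [hmin] at hle ⊢
      have hne : rs.foldl (fun acc w => min acc (f w)) (f r) ≠ M := by omega
      rw [if_neg hne]
      by_cases h2 : rs.foldl (fun acc w => min acc (f w)) (f r) = f r
      · have hb : (f r == rs.foldl (fun acc w => min acc (f w)) (f r)) = true := by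
          rw [beq_iff_eq]; omega
        rw [if_pos h2, hb]
        simp
      · have hb : (f r == rs.foldl (fun acc w => min acc (f w)) (f r)) = false := by
          rw [beq_eq_false_iff_ne]; intro h; exact h2 h.symm
        rw [if_neg h2, hb]
        simp
    · have hmin : min M (f r) = M := by omega
      by_cases h2 : f r = M
      · rw [if_neg h1, if_pos (by rw [beq_iff_eq]; exact h2), ih M (R ++ [r])]
        simp only [hmin] at hle ⊢
        by_cases h3 : rs.foldl (fun acc w => min acc (f w)) M = M
        · have hb : (f r == rs.foldl (fun acc w => min acc (f w)) M) = true := by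
            rw [beq_iff_eq]; omega
          rw [if_pos h3, if_pos h3, hb]
          simp
        · have hb : (f r == rs.foldl (fun acc w => min acc (f w)) M) = false := by
            rw [beq_eq_false_iff_ne]; intro h; omega
          rw [if_neg h3, if_neg h3, hb]
          simp
      · have h4 : M < f r := by omega
        rw [if_neg h1, if_neg (by simp only [beq_iff_eq]; exact h2), ih M R]
        simp only [hmin] at hle ⊢
        have hb : (f r == rs.foldl (fun acc w => min acc (f w)) M) = false := by
          rw [beq_eq_false_iff_ne]; intro h; omega
        rw [hb]
        simp

lemma zip_filter_fst (f : String → Int) (md : Int) :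
    ∀ (ws : List String),
    ((ws.zip (ws.map f)).filter (fun p => p.2 == md)).map (fun p => p.1)
      = ws.filter (fun w => f w == md) := by
  intro ws
  induction ws with
  | nil => simp
  | cons w ws ih =>
    simp only [List.map_cons, List.zip_cons_cons, List.filter_cons]
    by_cases h : f w == md
    · rw [if_pos h, if_pos h]
      simp only [List.map_cons, ih]
    · rw [if_neg (by simpa using h), if_neg (by simpa using h), ih]

-- the per-word memo dict never changes what the pass computes
lemma cache_elim (a : String) :
    ∀ (ws : List String) (dist : PySem.Dict String Int) (p : Option Int × List String),
    (∀ (w : String) (v : Int), dist.get? w = some v → v = pvEdMemo a w) →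
    (ws.foldl (pvStep a) (dist, p)).2
      = ws.foldl (fun (st : Option Int × List String) word =>
          let d := pvEdMemo a word
          match st.1 with
          | none => (some d, [word])
          | some b => if d < b then (some d, [word]) else if d == b then (some b, st.2 ++ [word]) else st) p := by
  intro ws
  induction ws with
  | nil => intro dist p _; rfl
  | cons w ws ih =>
    intro dist p hok
    simp only [List.foldl_cons]
    obtain ⟨dist', hd', hok'⟩ :
        ∃ dist', pvStep a (dist, p) w
            = (dist', (match p.1 with
              | none => (some (pvEdMemo a w), [w])
              | some b => if pvEdMemo a w < b then (some (pvEdMemo a w), [w])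
                  else if pvEdMemo a w == b then (some b, p.2 ++ [w]) else (some b, p.2)))
          ∧ (∀ (x : String) (v : Int), dist'.get? x = some v → v = pvEdMemo a x) := by
      obtain ⟨b0, r0⟩ := p
      cases hg : dist.get? w with
      | some v =>
        refine ⟨dist, ?_, hok⟩
        have hv : v = pvEdMemo a w := hok w v hg
        simp only [pvStep, hg, hv]
        cases b0 <;> dsimp only <;> first | rfl | (split_ifs <;> rfl)
      | none =>
        refine ⟨dist.insert w (pvEdMemo a w), ?_, ?_⟩
        · simp only [pvStep, hg]
          cases b0 <;> dsimp only <;> first | rfl | (split_ifs <;> rfl)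
        · intro x v hx
          rw [PySem.Dict.get?_insert] at hx
          by_cases hxw : x = w
          · rw [if_pos hxw] at hx
            cases hx
            rw [hxw]
          · rw [if_neg hxw] at hx
            exact hok x v hx
    rw [hd', ih dist' _ hok']
    obtain ⟨b0, r0⟩ := p
    cases b0 <;> rfl

lemma editing_eq_alt : ∀ (a : String) (words : List String), words ≠ [] →
    editing a words = editing_alt a words := by
  intro a words hne
  cases words with
  | nil => exact absurd rfl hne
  | cons w ws =>
    have hf : (fun word => pvEdDp a word) = (fun word => pvEdMemo a word) :=
      funext fun x => (key_A a x).trans (key_B a x).symm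
    simp only [editing, editing_alt, hf]
    rw [cache_elim a (w :: ws) PySem.Dict.empty ((none : Option Int), ([] : List String))
      (by intro x v hx; rw [PySem.Dict.get?_empty] at hx; exact absurd hx (by simp))]
    simp only [List.map_cons, PySem.List.min?_id_cons, List.foldl_map, List.foldl_cons]
    have hop := onepass (fun x => pvEdMemo a x) ws (pvEdMemo a w) [w]
    simp only [] at hop
    rw [hop]
    simp only []
    rw [show (pvEdMemo a w :: List.map (fun word => pvEdMemo a word) ws) = (w :: ws).map (fun x => pvEdMemo a x) from rfl,
        zip_filter_fst (fun x => pvEdMemo a x) (ws.foldl (fun acc x => min acc (pvEdMemo a x)) (pvEdMemo a w)) (w :: ws)]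
    have hble := mfold_le (fun x => pvEdMemo a x) ws (pvEdMemo a w)
    simp only [List.filter_cons]
    by_cases h : ws.foldl (fun acc x => min acc (pvEdMemo a x)) (pvEdMemo a w) = pvEdMemo a w
    · have hb : (pvEdMemo a w == ws.foldl (fun acc x => min acc (pvEdMemo a x)) (pvEdMemo a w)) = true := by
        rw [beq_iff_eq]; omega
      rw [hb, if_pos h]
      simp
    · have hb : (pvEdMemo a w == ws.foldl (fun acc x => min acc (pvEdMemo a x)) (pvEdMemo a w)) = false := by
        rw [beq_eq_false_iff_ne]; intro hx; exact h hx.symm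
      rw [hb, if_neg h]
      simp

-- ===== VERDICT (by name: the statement is the Claim_ definition above) =====
theorem editing_spec : Claim_equal_editing := by
  intro a words _ hpre
  show editing a words = editing_alt a words
  exact editing_eq_alt a words hpre
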